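/-
  CARRY LEMMAS OF THE HEAP'S CLIENTS: what a segment that calls `malloc` / `openbsd_reallocarray` and stores the result into a
  pointer field of gif needs besides the heap's contracts (proofs.shared ProgX/Spec/Heap.lean), ForestCarry.lean and HeapCarry.lean.
  The worked models: farm.gif/worked/GifAddExtensionBlock.1 (`reallocarray`: in place / moved / failed; the first `malloc`),
  GifAddExtensionBlock.2 (`malloc` between the stores of a new element), .3 (`memcpy` into the new object), .E (the epilogue).
  The recipes and the traps: farm.gif/hints/heap_client.md.

  THE KEY IDEA FOR A HEAP CLIENT. Neither `malloc` nor `reallocarray` writes a byte that `Shape F R` reads. Their static footprints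
  are LOOSE for the OLD heap and forest: the callee's stack, the control cell, the region at or above `next − 32`, a header's state
  word, the shadow (`Loose.alloc`, `Loose.realloc`). So at the callee's return `Shape F R w.mem` STILL holds, in EVERY outcome
  (`Shape.sameExcept` with the placement of the OLD heap): after a moving `realloc` the pointer field dangles — which `Shape` does
  not mind — and the freed array's bytes are intact. Only the heap `Hn` and what it owns change. The assertion at the callee's
  return therefore carries four things:
      `Shape F R w.mem`        the shape of the forest of the call, in the returned memory
      `Placed Hn F.owned`      where the OLD forest's objects are: `(h.owns.placed hok).push … / .release … / .resize …`
      `HeapInv Hn …`           the callee's post, restated at the body's stack pointer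
      `Owns Hn <new list>`     `Owns.push_cons` (a new object), `Owns.resize_head` (in place), `Owns.release` (moved), or the old one (NULL)
  and the store of the pointer field is then ONE step over `(Hn, w.mem)`: `GifOK.pend_first` / `.pend_grown` (`.saved_first` /
  `.saved_grown` for the SavedImages array) — inside: ONE `Shape.set_pend` with `ExtsAt.moved`, whose copy hypothesis is stated in
  the SAME memory (`rd w.mem (q + i) 1 = rd w.mem (x.arr + i) 1`: trivial in place, `copy_moved` after a move). In place and moved
  share one walk and one ownership step. When a count or an element was stored BEFORE the call (GifAddExtensionBlock's segment 2)
  the segment carries the cut's `GifOK` and the footprint since instead, and applies `GifOK.pend_snoc` once, at the exit.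

  THE RECIPE OF A SEGMENT THAT CALLS `malloc` / `reallocarray` (each numbered block is a block of the worked proofs):
    1. SPLIT ON THE GHOST BEFORE THE WALK (`cases hpend : F.pend`, the assertion's own disjunction) and give the load of the pointer
       field to the walker as a fact (`l_blocks`): each walk has one live arm.
    2. the callee's precondition: `HeapPre.callee` while only stack was written, `HeapInv.sameExcept` + `HeapWin.live` after
       stores into live objects; for `reallocarray` the capacity `c` from `H.Live p n = ∃ c, H.LiveCap p n c`.
    3. at the return label: `have habi … := w_inv` FIRST; the post with its type ascribed and the arguments rewritten to numbers;
       `v_after_call`, `simp only [shadowSpan, …] at w_same`; the slots (`slot_sameExcept` with ONE `hmiss` for all seven);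
       ONE `Mem.SameExcept [the callee's windows, literally] e.mem s.mem := by u_same`; `Shape.sameExcept` with `Loose.alloc` /
       `Loose.realloc`; a field read through the footprint: `read_through_alloc` (never `u_frame`: kernel time).
    4. the case split on `H.Fits …` (and `r16 m ≤ c` for `realloc`) LAST, each arm closing the mid assertion with its heap.
    5. from the mid assertion: the checked store (gif is live in `Hn`: `Owns.live` from the new list), `GifOK.pend_…`,
       `HeapInv.sameExcept`, `GifAddExtensionBlock.frame_carry` (the function's slots, footprint and `rem`).

  §1  LOOSE WINDOWS OF THE ALLOCATOR'S FOOTPRINTS                                                     namespace Gif.Spec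
      Loose.above_next           a window at or above the header of the NEXT chunk (`H.next − 32 ≤ w.lo`) is loose, WITH OR
                                 WITHOUT ROOM for the chunk: for static footprints (`Loose.above` asks `w.hi ≤ H.limit`, which a
                                 failed or in-place allocation does not give)
      Loose.alloc                every window of `malloc`'s footprint, as `v_after_call` + `simp only [shadowSpan, …]` leave it
                                 (4 windows: callee stack, control cell, next header, next shadow)
      Loose.realloc              every window of `openbsd_reallocarray`'s footprint (7 windows: the 4, the next object, the
                                 header's state word and the shadow of the old object)
  §2  READS THROUGH A CALLEE'S FOOTPRINT, OVER ABSTRACT MEMORIES (no `writeLE` nest in the context of `omega`)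
      read_through_alloc         a read inside the used part of the heap's region, through `malloc`'s 4 windows
      read_through_realloc       the same through `reallocarray`'s 7 windows, for a range that misses the old object's header
      copy_moved                 after a MOVING `realloc` the bytes at `H.next` are the bytes at `p`, IN THE RETURNED MEMORY
  §3  THE OWNED OBJECTS OF A FOREST WITH A CHANGED COMPONENT
      Forest.owned_pend_set      `(Exts.objs e' ++ F.ownedButPend) ~ { F with pend := e' }.owned`
      Forest.owned_saved_set     `(Saved.objs s' ++ F.ownedButSaved) ~ { F with saved := s' }.owned`
      Forest.owned_pend_snoc     `(Blk.objs b ++ F.owned) ~` the forest with one more counted block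
      Forest.mem_datas_snoc      the bytes of that block are a data object of the new forest
  §4  WHERE THE OBJECTS ARE, AS NUMBERS (`obtain ⟨h1, h2, h3⟩ := …`: one inequality per hypothesis, for the walker's side conditions;
      the third bound, `… + 64 ≤ H.next`, is what a read through the allocator's footprint needs: `read_through_alloc`)
      HeapOK.next_where          `0x800040 ≤ H.next ∧ H.next ≤ 0xC00020` for the PRESENT heap of a segment (`HeapPre.next_range`
                                 is the same for the heap of the function's entry)
      Placed.gif_where           `0x800040 ≤ F.gif ∧ F.gif + 152 ≤ 0xC00000 ∧ F.gif + 184 ≤ Hn.next` from `Placed Hn F.owned`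
                                 (it survives the heap's transitions)
      GifOK.gif_where, GifOK.pv_where, GifOK.pend_where
                                 the same from the state invariant, for gif, pv, the pending array
      GifOK.pend_live            the pending array is live with size `24 · cap`
      GifOK.pend_far_gif         the pending array and gif are 64 bytes apart
      GifOK.data_far_pv          a data object and pv are 64 bytes apart (the no-overlap clause of `memcpy(Bytes, ExtData, Len)`)
  §5  THE STORE OF THE RESULT INTO gif: THE STATE INVARIANT
      GifOK.pend_first           `*blocks = malloc(24)`, NULL included
      GifOK.pend_grown           `*blocks = reallocarray(*blocks, count + 1, 24)`, in place or moved
      GifOK.pend_snoc            one more counted block: `*count`, the slot behind the counted blocks, `malloc`'s footprint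
      GifOK.saved_first          `gif.SavedImages = malloc(56)`, NULL included
      GifOK.saved_grown          `gif.SavedImages = reallocarray(gif.SavedImages, k, 56)`, in place or moved
  §6  THE FRAME OF `GifAddExtensionBlock`                                                             namespace Gif.Spec.GifAddExtensionBlock
      frame_carry                the seven slots (six saved registers, the return address), the contract's footprint and `rem`
                                 at a later memory that differs in the function's own stack and the contract's coarse window
      AfterArray.frame_carry, AfterBytes.frame_carry
                                 the same from the assertion of a cut (what a segment starts from)
-/
import Gif.Spec.Carry
import Gif.Spec.HeapCarry
import Gif.Spec.LzwCarry
import Gif.Spec.Words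
import Gif.Spec.Seg_GifAddExtensionBlock
namespace Gif.Spec
open X86 X86.User Asan ProgX.Base ProgX.Base.Spec

/-! ### 1. Loose windows of the allocator's footprints -/

/-- **A window at or above the header of the NEXT chunk is loose**, whether or not there is room for the chunk. For the windows
`[next − 32, next − 8)`, `[next, next + m)` of the STATIC footprint of `malloc` / `reallocarray` (`Returned.same`), which a failed
or an in-place allocation has too: `Loose.above` asks for `w.hi ≤ H.limit`, which only `H.Fits` gives. The heap is the one heap.c
is compiled for (`hbase`: `hat.region.1.trans henv.heap.base`). -/
theorem Loose.above_next {H : Heap} {F : Forest} {R : Rd} {mem : Mem} {w : Span} (hok : HeapOK H mem)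
    (hbase : H.base = 0x800000) (hcur : 0x700000 ≤ R.cur ∧ R.cur + 16 ≤ 0x800000) (h1 : H.next - 32 ≤ w.lo) :
    Loose H F R w := by
  rw [Heap.next_def, hbase] at h1
  refine Or.inl ⟨?_, Or.inr (by omega), Or.inr (by omega)⟩
  intro o ho
  have hr := hok.obj_range ho
  rw [hbase] at hr
  right
  omega

/-- **Every window of `malloc`'s footprint is loose** for the heap and the forest of the call. The list is LITERALLY what
`v_after_call` and `simp only [shadowSpan, w_rdi_<addr>, …] at w_same` leave (after `u_same` has widened the callee's stack frame
to the function's own window `[lo, hi)` below the cursor): the stack, the control cell, the next chunk's header, the shadow of the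
next object of `k` bytes. The argument of `Shape.sameExcept` / `GifOK.sameExcept` at the return of `malloc(k)`, fitting or not. -/
theorem Loose.alloc {H : Heap} {F : Forest} {R : Rd} {mem : Mem} {lo hi k : Nat} (hok : HeapOK H mem)
    (hbase : H.base = 0x800000) (hcur : 0x700000 ≤ R.cur ∧ R.cur + 16 ≤ 0x800000) (hlo : 0x700000 ≤ lo) (hhi : hi ≤ R.cur) :
    ∀ w, w ∈ [(⟨lo, hi⟩ : Span), ⟨0x800000, 0x800008⟩, ⟨H.next - 32, H.next - 8⟩,
      ⟨0xC00000 + H.next / 8, 0xC00000 + (H.next + k + 7) / 8⟩] → Loose H F R w := by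
  intro w hw
  simp only [List.mem_cons, List.not_mem_nil, or_false] at hw
  rcases hw with hw | hw | hw | hw
  · subst hw
    exact Loose.stack hok (by simp only; omega) (by simp only; omega) (by simp only; omega)
  · subst hw
    exact Loose.cell hok hcur (by rw [hbase]; simp only; omega) (by rw [hbase]; simp only; omega)
  · subst hw
    exact Loose.above_next hok hbase hcur (Nat.le_refl _)
  · subst hw
    exact Loose.shadow hok hcur.2 (by simp only; omega)

/-- **Every window of `openbsd_reallocarray`'s footprint is loose** for the heap and the forest of the call, for the live object
`(p, n)` of capacity `c` and the new size `m`. The list is LITERALLY what `v_after_call` and `simp only [shadowSpan, …] at w_same`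
leave: the stack, the control cell, the next chunk's header, the shadow of the next object, the next object, the state word and
the capacity of `p`'s header, the shadow of `p`. No byte of any object is in it: the argument of `Shape.sameExcept` at the return
of `reallocarray`, in all three outcomes. -/
theorem Loose.realloc {H : Heap} {F : Forest} {R : Rd} {mem : Mem} {lo hi m p n c : Nat} (hok : HeapOK H mem)
    (hbase : H.base = 0x800000) (hcur : 0x700000 ≤ R.cur ∧ R.cur + 16 ≤ 0x800000) (hlo : 0x700000 ≤ lo) (hhi : hi ≤ R.cur)
    (hl : H.LiveCap p n c) :
    ∀ w, w ∈ [(⟨lo, hi⟩ : Span), ⟨0x800000, 0x800008⟩, ⟨H.next - 32, H.next - 8⟩,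
      ⟨0xC00000 + H.next / 8, 0xC00000 + (H.next + m + 7) / 8⟩, ⟨H.next, H.next + m⟩, ⟨p - 32, p - 16⟩,
      ⟨0xC00000 + p / 8, 0xC00000 + (p + c + 7) / 8⟩] → Loose H F R w := by
  intro w hw
  simp only [List.mem_cons, List.not_mem_nil, or_false] at hw
  rcases hw with hw | hw | hw | hw | hw | hw | hw
  · subst hw
    exact Loose.stack hok (by simp only; omega) (by simp only; omega) (by simp only; omega)
  · subst hw
    exact Loose.cell hok hcur (by rw [hbase]; simp only; omega) (by rw [hbase]; simp only; omega)
  · subst hw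
    exact Loose.above_next hok hbase hcur (Nat.le_refl _)
  · subst hw
    exact Loose.shadow hok hcur.2 (by simp only; omega)
  · subst hw
    exact Loose.above_next hok hbase hcur (by simp only; omega)
  · subst hw
    exact Loose.header hok hcur hl (by simp only; omega) (by simp only; omega)
  · subst hw
    exact Loose.shadow hok hcur.2 (by simp only; omega)

/-! ### 2. Reads through a callee's footprint, over abstract memories -/

/-- **A read inside the used part of the heap's region, through the footprint of `malloc`** (`w_same` as `v_after_call` leaves it):
the bytes of every object of the heap are as they were. Stated over ABSTRACT memories `m0 m1`: apply it to the walker's `w_same`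
and the value read before the call. (The same side conditions proved in the segment's own context, where `omega`'s atoms are
`writeLE` nests, cost a minute of kernel time.) For a field of an object stored before the call and needed after it. -/
theorem read_through_alloc {m0 m1 : Mem} {H : Heap} {lo hi n : Nat}
    (hs : Mem.SameExcept [⟨lo, hi⟩, ⟨0x800000, 0x800008⟩, ⟨H.next - 32, H.next - 8⟩,
      ⟨0xC00000 + H.next / 8, 0xC00000 + (H.next + n + 7) / 8⟩] m0 m1)
    (a : Word) (k x : Nat) (hstack : hi ≤ 0x800000) (h1 : 0x800008 ≤ a.toNat) (h2 : a.toNat + k ≤ H.next - 32)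
    (hnx : H.next ≤ 0xC00020) (h : m0.readLE a k = x) : m1.readLE a k = x := by
  rw [hs.readLE a k (by omega) ?_]
  · exact h
  · intro w hw
    simp only [List.mem_cons, List.not_mem_nil, or_false] at hw
    rcases hw with hw | hw | hw | hw
    · subst hw
      simp only
      omega
    · subst hw
      simp only
      omega
    · subst hw
      simp only
      omega
    · subst hw
      simp only
      omega

/-- **A read inside the used part of the heap's region, through the footprint of `openbsd_reallocarray`** for the old object at `p`:
the range `[a, a + k)` lies between the control cell and the next chunk's header and misses the 16 bytes `[p − 32, p − 16)` of the
old object's header (a field of ANOTHER object, or of the old object itself: `p ≤ a`). Over abstract memories, as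
`read_through_alloc`. -/
theorem read_through_realloc {m0 m1 : Mem} {H : Heap} {lo hi m p c : Nat}
    (hs : Mem.SameExcept [⟨lo, hi⟩, ⟨0x800000, 0x800008⟩, ⟨H.next - 32, H.next - 8⟩,
      ⟨0xC00000 + H.next / 8, 0xC00000 + (H.next + m + 7) / 8⟩, ⟨H.next, H.next + m⟩, ⟨p - 32, p - 16⟩,
      ⟨0xC00000 + p / 8, 0xC00000 + (p + c + 7) / 8⟩] m0 m1)
    (a : Word) (k x : Nat) (hstack : hi ≤ 0x800000) (h1 : 0x800008 ≤ a.toNat) (h2 : a.toNat + k ≤ H.next - 32)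
    (hnx : H.next ≤ 0xC00020) (hp : a.toNat + k ≤ p - 32 ∨ p - 16 ≤ a.toNat) (h : m0.readLE a k = x) :
    m1.readLE a k = x := by
  rw [hs.readLE a k (by omega) ?_]
  · exact h
  · intro w hw
    simp only [List.mem_cons, List.not_mem_nil, or_false] at hw
    rcases hw with hw | hw | hw | hw | hw | hw | hw
    · subst hw
      simp only
      omega
    · subst hw
      simp only
      omega
    · subst hw
      simp only
      omega
    · subst hw
      simp only
      omega
    · subst hw
      simp only
      omega
    · subst hw
      simp only
      omega
    · subst hw
      simp only
      omega

/-- **After a MOVING `realloc` the bytes at the new address are the bytes at the old one, IN THE SAME MEMORY.** The copy clause of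
`ReallocPost` compares the new object after the call (`m1`) with the old one before it (`m0`); the old object's bytes are not in
the footprint (only its header's state word and its shadow are): the freed array still reads as it did. `m0` is the memory at the
callee's entry, `m1` at its return, `hs` the walker's `w_same` (stated over the callee's entry memory: `rw [← w_mem_<addr>]`),
`hcopy` the third clause of the moved arm. The result is the copy hypothesis of `GifOK.pend_grown` / `.saved_grown`. -/
theorem copy_moved {H : Heap} {mem m0 m1 : Mem} {lo hi m p n c : Nat} (hok : HeapOK H mem) (hbase : H.base = 0x800000)
    (hl : H.LiveCap p n c) (hhi : hi ≤ 0x800000)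
    (hs : Mem.SameExcept [⟨lo, hi⟩, ⟨0x800000, 0x800008⟩, ⟨H.next - 32, H.next - 8⟩,
      ⟨0xC00000 + H.next / 8, 0xC00000 + (H.next + m + 7) / 8⟩, ⟨H.next, H.next + m⟩, ⟨p - 32, p - 16⟩,
      ⟨0xC00000 + p / 8, 0xC00000 + (p + c + 7) / 8⟩] m0 m1)
    (hcopy : ∀ i, i < n → m1.readLE (UInt64.ofNat (H.next + i)) 1 = m0.readLE (UInt64.ofNat (p + i)) 1) :
    ∀ i, i < n → rd m1 (H.next + i) 1 = rd m1 (p + i) 1 := by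
  intro i hi
  have hr := hok.obj_range hl
  have hin := hok.obj_inside hl
  have hab := hok.next_above hl
  have hsc := hok.size_le_cap hl
  have hnx := Heap.next_def H
  simp only at hr hin hab hsc
  rw [hbase] at hr hnx
  have e1 : rd m1 (p + i) 1 = rd m0 (p + i) 1 := by
    apply hs.rd (p + i) 1 (by omega)
    intro y hy
    simp only [List.mem_cons, List.not_mem_nil, or_false] at hy
    rcases hy with hy | hy | hy | hy | hy | hy | hy
    · subst hy
      simp only
      omega
    · subst hy
      simp only
      omega
    · subst hy
      simp only
      omega
    · subst hy
      simp only
      omega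
    · subst hy
      simp only
      omega
    · subst hy
      simp only
      omega
    · subst hy
      simp only
      omega
  rw [e1, rd_def, rd_def]
  exact hcopy i hi

/-! ### 3. The owned objects of a forest with a changed component -/

/-- **The owned objects of the forest with another pending list**: the list's objects, in front of the other components'. The
permutation for `Owns.perm` after the store of `gif.ExtensionBlocks`. -/
theorem Forest.owned_pend_set (F : Forest) (e' : Option Exts) :
    (Exts.objs e' ++ F.ownedButPend).Perm ({ F with pend := e' } : Forest).owned := by
  have h := Forest.owned_pend ({ F with pend := e' } : Forest)
  rw [Forest.ownedButPend_set] at h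
  exact h.symm

/-- **The owned objects of the forest with another SavedImages array**: the array's objects, in front of the other components'. The
permutation for `Owns.perm` after the store of `gif.SavedImages`. -/
theorem Forest.owned_saved_set (F : Forest) (s' : Option Saved) :
    (Saved.objs s' ++ F.ownedButSaved).Perm ({ F with saved := s' } : Forest).owned := by
  have h := Forest.owned_saved ({ F with saved := s' } : Forest)
  rw [Forest.ownedButSaved_set] at h
  exact h.symm

/-- **The owned objects of the forest with one more counted block in the pending list**: the block's object (none if its `Bytes`
is NULL), in front of what was owned. For `Owns.perm` after `Owns.push_cons` (the allocation succeeded: `Blk.objs b = [(next, len)]`)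
or with the old `Owns` (it failed: `Blk.objs b = []`). -/
theorem Forest.owned_pend_snoc (F : Forest) (x : Exts) (b : Blk) (hx : F.pend = some x) :
    (Blk.objs b ++ F.owned).Perm ({ F with pend := some { x with blocks := x.blocks ++ [b] } } : Forest).owned := by
  have h1 : F.owned.Perm (Exts.objs (some x) ++ F.ownedButPend) := by
    have := Forest.owned_pend F
    rw [hx] at this
    exact this
  have h2 := Forest.owned_pend ({ F with pend := some { x with blocks := x.blocks ++ [b] } } : Forest)
  rw [Forest.ownedButPend_set] at h2
  have h3 : (Exts.objs (some ({ x with blocks := x.blocks ++ [b] } : Exts))).Perm (Blk.objs b ++ Exts.objs (some x)) :=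
    Exts.objs_snoc x.arr x.cap x.blocks b
  have h4 : (Blk.objs b ++ F.owned).Perm (Blk.objs b ++ (Exts.objs (some x) ++ F.ownedButPend)) := h1.append_left _
  have h5 : (Blk.objs b ++ (Exts.objs (some x) ++ F.ownedButPend)).Perm
      (Exts.objs (some ({ x with blocks := x.blocks ++ [b] } : Exts)) ++ F.ownedButPend) := by
    rw [← List.append_assoc]
    exact h3.symm.append_right _
  exact (h4.trans h5).trans h2.symm

/-- **The bytes of the new block are a data object of the new forest**: the clause `rbp ∈ Fc.datas` of an assertion behind the
allocation of a block's bytes (the destination of the `memcpy` that follows: live by `Owns.live`, loose by `Loose.data`). -/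
theorem Forest.mem_datas_snoc (F : Forest) (x : Exts) (p n : Nat) (hp : p ≠ 0) :
    (p, n) ∈ ({ F with pend := some { x with blocks := x.blocks ++ [⟨p, n⟩] } } : Forest).datas := by
  unfold Forest.datas
  apply List.mem_append_right
  simp only [Exts.datas, List.flatMap_append, List.flatMap_cons, List.flatMap_nil, List.append_nil]
  apply List.mem_append_right
  unfold Blk.objs
  simp only [hp, if_false, List.mem_singleton]

/-! ### 4. Where the objects are, as numbers -/

/-- **Where the next object of the present heap lies**: inside the region `[800000H, C00000H)` with its left red zone. For a heap
that is not the entry's (`hbase`, `hlimit` from the assertion's `region`: `hat.region.1.trans henv.heap.base`). -/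
theorem _root_.Asan.HeapOK.next_where {H : Heap} {mem : Mem} (hok : HeapOK H mem) (hbase : H.base = 0x800000)
    (hlimit : H.limit = 0xC00000) : 0x800040 ≤ H.next ∧ H.next ≤ 0xC00020 := by
  have hroom := hok.room
  rw [hbase, hlimit] at hroom
  rw [Heap.next_def, hbase]
  omega

/-- **Where gif is, from `Placed`** (the geometry that survives every transition of the heap): behind the control cell and its
own red zone, its red zone ending inside the data space, its chunk below the next one. For the segment behind a callee that
changed the heap (`Placed Hn F.owned` of the mid assertion): the walker places the store of the pointer field with the bounds. -/
theorem Placed.gif_where {Hn : Heap} {F : Forest} {mem : Mem} (hplaced : Placed Hn F.owned) (hokn : HeapOK Hn mem)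
    (hbase : Hn.base = 0x800000) : 0x800040 ≤ F.gif ∧ F.gif + 152 ≤ 0xC00000 ∧ F.gif + 184 ≤ Hn.next := by
  obtain ⟨o, ho, e1, e2⟩ := hplaced.at_ (F.gif, 120) List.mem_cons_self
  have hi := hokn.obj_inside ho
  have hr := hokn.obj_range ho
  have hn := hokn.next_above ho
  rw [hbase] at hr
  simp only at e1 e2
  omega

/-- **Where gif is**, from the state invariant: the bounds the walker's side conditions need (`obtain ⟨hg1, hg2, hg3⟩ := …`). -/
theorem GifOK.gif_where {H : Heap} {F : Forest} {R : Rd} {mem mem₀ : Mem} (h : GifOK H F R mem) (hok : HeapOK H mem₀)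
    (hbase : H.base = 0x800000) : 0x800040 ≤ F.gif ∧ F.gif + 152 ≤ 0xC00000 ∧ F.gif + 184 ≤ H.next :=
  (h.owns.placed hok).gif_where hok hbase

/-- **Where the private object is**, from the state invariant. -/
theorem GifOK.pv_where {H : Heap} {F : Forest} {R : Rd} {mem mem₀ : Mem} (h : GifOK H F R mem) (hok : HeapOK H mem₀)
    (hbase : H.base = 0x800000) : 0x800040 ≤ F.pv ∧ F.pv + 24968 ≤ 0xC00000 ∧ F.pv + 25000 ≤ H.next := by
  have hin := h.owns.inside hok (o := (F.pv, 24936)) (List.mem_cons_of_mem _ List.mem_cons_self)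
  have hnx := Heap.next_def H
  simp only at hin
  rw [hbase] at hin hnx
  omega

/-- **The pending array is live**, with the size the forest gives it: what a check of a slot of the array asks (`.liveIn`), and
the `H.LiveCap` of `reallocarray`'s precondition (`obtain ⟨c, hlc⟩ := …`). -/
theorem GifOK.pend_live {H : Heap} {F : Forest} {R : Rd} {mem : Mem} (h : GifOK H F R mem) {x : Exts} (hx : F.pend = some x) :
    H.Live x.arr (24 * x.cap) := by
  apply h.owns.live (x.arr, 24 * x.cap)
  apply Forest.mem_owned_pend
  rw [hx]
  exact List.mem_cons_self

/-- **Where the pending array is**, from the state invariant. -/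
theorem GifOK.pend_where {H : Heap} {F : Forest} {R : Rd} {mem mem₀ : Mem} (h : GifOK H F R mem) (hok : HeapOK H mem₀)
    (hbase : H.base = 0x800000) {x : Exts} (hx : F.pend = some x) :
    0x800040 ≤ x.arr ∧ x.arr + 24 * x.cap + 32 ≤ 0xC00000 ∧ x.arr + 24 * x.cap + 64 ≤ H.next := by
  have harr : (x.arr, 24 * x.cap) ∈ F.owned := by
    apply Forest.mem_owned_pend
    rw [hx]
    exact List.mem_cons_self
  have hin := h.owns.inside hok harr
  have hnx := Heap.next_def H
  simp only at hin
  rw [hbase] at hin hnx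
  omega

/-- **The pending array and gif are two objects, 64 bytes apart**: what reading `*count` back through the stores to a slot of the
array needs (`Owns.far` with the array's entry of `F.owned`). A DISJUNCTION: build it inside the one `have` that needs it, never
keep it in the context of `u_frame` / `u_read` (kernel time). -/
theorem GifOK.pend_far_gif {H : Heap} {F : Forest} {R : Rd} {mem : Mem} (h : GifOK H F R mem) (hok : HeapOK H mem) {x : Exts}
    (hx : F.pend = some x) : F.gif + 120 + 64 ≤ x.arr ∨ x.arr + 24 * x.cap + 64 ≤ F.gif := by
  have harr : (x.arr, 24 * x.cap) ∈ F.owned := Forest.mem_owned_pend (by rw [hx]; exact List.mem_cons_self)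
  have hstruct : (x.arr, 24 * x.blocks.length) ∈ F.structs := carry_mem_structs_pend (by rw [hx]; exact List.mem_cons_self)
  have hne := ((h.owns.placed hok).structs_ne.1 _ hstruct).1
  simp only at hne
  have hfar := h.owns.far hok (a := (F.gif, 120)) (b := (x.arr, 24 * x.cap)) List.mem_cons_self harr (by
    intro e
    exact hne (congrArg Prod.fst e).symm)
  simp only at hfar
  exact hfar

/-- **A data object of the forest and the private object are two objects, 64 bytes apart**: the no-overlap clause of a `memcpy`
between `pv.Buf` and a block's bytes / a raster / a colour array (`Owns.far`; a data object is not pv: `Placed.structs_ne`). -/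
theorem GifOK.data_far_pv {H : Heap} {F : Forest} {R : Rd} {mem : Mem} (h : GifOK H F R mem) (hok : HeapOK H mem)
    {d : Nat × Nat} (hd : d ∈ F.datas) : F.pv + 24936 + 64 ≤ d.1 ∨ d.1 + d.2 + 64 ≤ F.pv := by
  have hne := ((h.owns.placed hok).structs_ne.2 d hd).2.1
  have hpv : (F.pv, 24936) ∈ F.owned := List.mem_cons_of_mem _ List.mem_cons_self
  have hfar := h.owns.far hok (a := (F.pv, 24936)) (b := d) hpv (F.datas_owned d hd) (by
    intro e
    exact hne (congrArg Prod.fst e).symm)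
  simp only at hfar
  exact hfar

/-! ### 5. The store of the result into gif: the state invariant -/

/-- **`*blocks = malloc(24)`, NULL included: THE STATE INVARIANT** (GifAddExtensionBlock l.235-236, the first block's array).
`mem` is the memory at the return of `malloc`: the shape of the forest `F` (no pending list) still holds; the present heap `Hn`
owns what `F` owns and the new object `(q, 24)` (none if `q = 0`: both outcomes of `AllocPost` in one clause). `mem'` differs in a
window of stack below the cursor and in the field `gif.ExtensionBlocks`, which holds `q`. Then the invariant holds for the forest
whose pending list is the empty array of ONE slot at `q` (none if `q = 0`). -/
theorem GifOK.pend_first {Hn : Heap} {F : Forest} {R : Rd} {mem mem' : Mem} {q lo hi : Nat}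
    (hshape : Shape F R mem) (hplaced : Placed Hn F.owned) (hokn : HeapOK Hn mem) (hbase : Hn.base = 0x800000)
    (hcur : 0x700000 ≤ R.cur ∧ R.cur + 16 ≤ 0x800000) (hx : F.pend = none)
    (howns : Owns Hn ((if q = 0 then [] else [(q, 24)]) ++ F.owned))
    (hs : Mem.SameExcept [⟨lo, hi⟩, ⟨F.gif + 88, F.gif + 96⟩] mem mem') (hlo : 0x700000 ≤ lo) (hhi : hi ≤ R.cur)
    (hq : rd mem' (F.gif + 88) 8 = q) :
    GifOK Hn ({ F with pend := if q = 0 then none else some ⟨q, 1, []⟩ } : Forest) R mem' := by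
  have hgw := hplaced.gif_where hokn hbase
  have hold : F.owned.Perm (F.ownedButPend) := by
    have h := Forest.owned_pend F
    rw [hx] at h
    exact h
  -- the count is still 0
  have hp := hshape.pend
  rw [hx] at hp
  obtain ⟨-, hc0⟩ := hp
  have ecount : GifFileType.ExtensionBlockCount mem' F.gif = 0 := by
    simp only [gfield] at hc0 ⊢
    rw [hs.rd (F.gif + 80) 4 (by omega) ?_]
    · exact hc0
    · intro w hw
      simp only [List.mem_cons, List.not_mem_nil, or_false] at hw
      rcases hw with hw | hw
      · subst hw
        simp only
        omega
      · subst hw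
        simp only
        omega
  have eptr : GifFileType.ExtensionBlocks mem' F.gif = q := by
    simp only [gfield]
    exact hq
  -- the windows: stack, `*blocks`
  have hl : ∀ w, w ∈ [(⟨lo, hi⟩ : Span), ⟨F.gif + 88, F.gif + 96⟩] → Loose Hn F R w ∨ (F.gif + 88 ≤ w.lo ∧ w.hi ≤ F.gif + 96) ∨
      (F.gif + 80 ≤ w.lo ∧ w.hi ≤ F.gif + 84) ∨
      (∃ e x, F.pend = some e ∧ x ∈ Hn.objs ∧ x.base = e.arr ∧ e.arr ≤ w.lo ∧ w.hi ≤ e.arr + x.cap) := by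
    intro w hw
    simp only [List.mem_cons, List.not_mem_nil, or_false] at hw
    rcases hw with hw | hw
    · subst hw
      left
      exact Loose.stack hokn (by simp only; omega) (by simp only; omega) (by simp only; omega)
    · subst hw
      right
      left
      exact ⟨Nat.le_refl _, Nat.le_refl _⟩
  by_cases hq0 : q = 0
  · -- the allocation failed: no list, as before
    rw [if_pos hq0] at howns ⊢
    refine ⟨?_, ?_⟩
    · have h1 : Owns Hn F.owned := howns
      exact (h1.perm hold).perm (Forest.owned_pend_set F none)
    · apply hshape.set_pend hplaced hokn hcur hs hl
      rw [eptr, ecount]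
      exact ⟨hq0, rfl⟩
  · -- the empty array of one slot
    rw [if_neg hq0] at howns ⊢
    refine ⟨?_, ?_⟩
    · have h1 : Owns Hn ((q, 24) :: F.ownedButPend) := howns.perm (hold.cons _)
      have h2 : ((q, 24) :: F.ownedButPend).Perm ({ F with pend := some ⟨q, 1, []⟩ } : Forest).owned :=
        Forest.owned_pend_set F (some ⟨q, 1, []⟩)
      exact h1.perm h2
    · apply hshape.set_pend hplaced hokn hcur hs hl
      rw [eptr, ecount]
      exact ExtsAt.empty q 1 mem'

/-- **`*blocks = reallocarray(*blocks, count + 1, 24)`, in place or moved: THE STATE INVARIANT** (GifAddExtensionBlock l.238-244).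
`mem` is the memory at the return of `reallocarray`: the shape of the forest `F` with the pending list `x` still holds (a moving
`realloc` leaves `*blocks` dangling and the freed array's bytes intact); the present heap `Hn` — at heap.c's place — owns the
array `(q, 24 k)`, the bytes of the counted blocks and the other components' objects (`Owns.resize_head`, or `Owns.push_cons` +
`Owns.release`, over `Forest.owned_pend`; the callee says `k * 24`: ONE `rw [Nat.mul_comm] at howns` where no heap term occurs);
the counted blocks' bytes at `q` are those at `x.arr` (`q = x.arr`: `rfl`; moved: `copy_moved`). `mem'` differs in a window of
stack below the cursor and in the field `gif.ExtensionBlocks`, which holds `q`. Then the invariant holds for the forest whose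
pending list is the old blocks in the array `(q, k slots)`. -/
theorem GifOK.pend_grown {Hn : Heap} {F : Forest} {R : Rd} {mem mem' : Mem} {x : Exts} {q k lo hi : Nat}
    (hshape : Shape F R mem) (hplaced : Placed Hn F.owned) (hokn : HeapOK Hn mem) (hbase : Hn.base = 0x800000)
    (hcur : 0x700000 ≤ R.cur ∧ R.cur + 16 ≤ 0x800000) (hx : F.pend = some x)
    (howns : Owns Hn ((q, 24 * k) :: (x.blocks.flatMap Blk.objs ++ F.ownedButPend))) (hk : x.blocks.length ≤ k)
    (hcopy : ∀ i, i < 24 * x.blocks.length → rd mem (q + i) 1 = rd mem (x.arr + i) 1)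
    (hs : Mem.SameExcept [⟨lo, hi⟩, ⟨F.gif + 88, F.gif + 96⟩] mem mem') (hlo : 0x700000 ≤ lo) (hhi : hi ≤ R.cur)
    (hq : rd mem' (F.gif + 88) 8 = q) :
    GifOK Hn ({ F with pend := some { x with arr := q, cap := k } } : Forest) R mem' := by
  have hgw := hplaced.gif_where hokn hbase
  -- where the new array and the old one are
  have hqin : (q, 24 * k) ∈ (q, 24 * k) :: (x.blocks.flatMap Blk.objs ++ F.ownedButPend) := List.mem_cons_self
  have hgin : (F.gif, 120) ∈ (q, 24 * k) :: (x.blocks.flatMap Blk.objs ++ F.ownedButPend) :=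
    List.mem_cons_of_mem _ (List.mem_append_right _ List.mem_cons_self)
  have hqw := howns.inside hokn hqin
  simp only at hqw
  rw [hbase] at hqw
  have hqne : q ≠ F.gif :=
    (List.pairwise_cons.mp howns.apart).1 (F.gif, 120) (List.mem_append_right _ List.mem_cons_self)
  have hfar := howns.far hokn hqin hgin (by
    intro h
    exact hqne (congrArg Prod.fst h))
  simp only at hfar
  have harr : (x.arr, 24 * x.cap) ∈ F.owned := Forest.mem_owned_pend (by rw [hx]; exact List.mem_cons_self)
  obtain ⟨o, ho, eo1, eo2⟩ := hplaced.at_ _ harr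
  have hoin := hokn.obj_inside ho
  simp only at eo1 eo2
  -- the old list
  have hp := hshape.pend
  rw [hx] at hp
  have hlen := hp.2.2.1
  have ecount : GifFileType.ExtensionBlockCount mem' F.gif = GifFileType.ExtensionBlockCount mem F.gif := by
    simp only [gfield]
    apply hs.rd (F.gif + 80) 4 (by omega)
    intro w hw
    simp only [List.mem_cons, List.not_mem_nil, or_false] at hw
    rcases hw with hw | hw
    · subst hw
      simp only
      omega
    · subst hw
      simp only
      omega
  have eptr : GifFileType.ExtensionBlocks mem' F.gif = q := by
    simp only [gfield]
    exact hq
  refine ⟨howns.perm (Forest.owned_pend_set F (some { x with arr := q, cap := k })), ?_⟩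
  apply hshape.set_pend hplaced hokn hcur hs
  · intro w hw
    simp only [List.mem_cons, List.not_mem_nil, or_false] at hw
    rcases hw with hw | hw
    · subst hw
      left
      exact Loose.stack hokn (by simp only; omega) (by simp only; omega) (by simp only; omega)
    · subst hw
      right
      left
      exact ⟨Nat.le_refl _, Nat.le_refl _⟩
  · rw [eptr, ecount]
    apply ExtsAt.moved hp q k ?_ hk (by omega) (by omega)
    intro i hi
    rw [← hcopy i hi]
    apply hs.rd (q + i) 1 (by omega)
    intro w hw
    simp only [List.mem_cons, List.not_mem_nil, or_false] at hw
    rcases hw with hw | hw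
    · subst hw
      simp only
      omega
    · subst hw
      simp only
      omega

/-- **ONE MORE COUNTED BLOCK IN THE PENDING LIST: THE STATE INVARIANT** (GifAddExtensionBlock l.251-255, the whole ownership step
of a segment that stores the count and the new element AROUND a `malloc`). `mem` is a memory with the state invariant for the heap
`Hc` and the forest `Fc` whose pending list `x` has room (the segment's entry); `mem'` differs from it in a window of stack below
the cursor, in `*count`, in the slot `ep = x.arr + 24 · length` behind the counted blocks, and in `malloc`'s footprint (the
control cell, the next chunk's header, the shadow of the next object); the count is the new one, the slot holds the block
`⟨b, len⟩`; the present heap `Hm` owns what the forest owned and the block's object (none if `b = 0`: the allocation failed,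
design F-2). Then the invariant holds for `Hm` and the forest with the block counted. -/
theorem GifOK.pend_snoc {Hc Hm : Heap} {Fc : Forest} {R : Rd} {mem mem' : Mem} {x : Exts} {b len k lo hi : Nat}
    (h : GifOK Hc Fc R mem) (hok : HeapOK Hc mem) (hbase : Hc.base = 0x800000)
    (hcur : 0x700000 ≤ R.cur ∧ R.cur + 16 ≤ 0x800000) (hx : Fc.pend = some x) (hroom : x.blocks.length + 1 ≤ x.cap)
    (hl1 : 1 ≤ len) (hl2 : len ≤ 255)
    (howns : Owns Hm (Blk.objs ⟨b, len⟩ ++ Fc.owned))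
    (hs : Mem.SameExcept
      [⟨lo, hi⟩,
       ⟨Fc.gif + 80, Fc.gif + 84⟩,
       ⟨x.arr + 24 * x.blocks.length, x.arr + 24 * x.blocks.length + 24⟩,
       ⟨0x800000, 0x800008⟩,
       ⟨Hc.next - 32, Hc.next - 8⟩,
       ⟨0xC00000 + Hc.next / 8, 0xC00000 + (Hc.next + k + 7) / 8⟩] mem mem')
    (hlo : 0x700000 ≤ lo) (hhi : hi ≤ R.cur)
    (hcount : rd mem' (Fc.gif + 80) 4 = x.blocks.length + 1)
    (hbc : rd mem' (x.arr + 24 * x.blocks.length) 4 = len)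
    (hby : rd mem' (x.arr + 24 * x.blocks.length + 8) 8 = b) :
    GifOK Hm ({ Fc with pend := some { x with blocks := x.blocks ++ [⟨b, len⟩] } } : Forest) R mem' := by
  refine ⟨howns.perm (Forest.owned_pend_snoc Fc x ⟨b, len⟩ hx), ?_⟩
  -- where gif, the array and the next chunk are
  have harr : (x.arr, 24 * x.cap) ∈ Fc.owned := Forest.mem_owned_pend (by rw [hx]; exact List.mem_cons_self)
  have hain := h.owns.inside hok harr
  have hgin := h.owns.inside hok (o := (Fc.gif, 120)) List.mem_cons_self
  simp only at hain hgin
  rw [hbase] at hain hgin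
  have hfar := h.pend_far_gif hok hx
  have hnx := Heap.next_def Hc
  rw [hbase] at hnx
  -- the old list
  have hshape := h.shape.pend
  rw [hx] at hshape
  apply h.shape.set_pend (h.owns.placed hok) hok hcur hs
  · -- every window is loose, or `*count`, or the array's
    intro w hw
    simp only [List.mem_cons, List.not_mem_nil, or_false] at hw
    rcases hw with hw | hw | hw | hw | hw | hw
    · subst hw
      left
      exact Loose.stack hok (by simp only; omega) (by simp only; omega) (by simp only; omega)
    · subst hw
      right
      right
      left
      exact ⟨Nat.le_refl _, Nat.le_refl _⟩
    · subst hw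
      left
      exact (Loose.pendTail hok h.owns hx (by simp only; omega) (by simp only; omega)).1
    · subst hw
      left
      exact Loose.cell hok hcur (by rw [hbase]; simp only; omega) (by rw [hbase]; simp only; omega)
    · subst hw
      left
      exact Loose.above_next hok hbase hcur (Nat.le_refl _)
    · subst hw
      left
      exact Loose.shadow hok hcur.2 (by simp only; omega)
  · -- the list with the new block, in the new memory
    have e1 : GifFileType.ExtensionBlocks mem' Fc.gif = GifFileType.ExtensionBlocks mem Fc.gif := by
      simp only [gfield]
      apply hs.rd (Fc.gif + 88) 8 (by omega)
      intro w hw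
      simp only [List.mem_cons, List.not_mem_nil, or_false] at hw
      rcases hw with hw | hw | hw | hw | hw | hw
      · subst hw
        simp only
        omega
      · subst hw
        simp only
        omega
      · subst hw
        simp only
        omega
      · subst hw
        simp only
        omega
      · subst hw
        simp only
        omega
      · subst hw
        simp only
        omega
    have e2 : GifFileType.ExtensionBlockCount mem' Fc.gif = GifFileType.ExtensionBlockCount mem Fc.gif + 1 := by
      have hc := hshape.2.1
      simp only [gfield] at hc ⊢
      rw [hcount, hc]
    rw [e1, e2]
    apply ExtsAt.snoc hshape ?_ (by omega) hroom ?_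
    · -- the counted blocks are untouched
      apply hs.eqOn
      intro w hw
      simp only [List.mem_cons, List.not_mem_nil, or_false] at hw
      rcases hw with hw | hw | hw | hw | hw | hw
      · subst hw
        simp only
        omega
      · subst hw
        simp only
        omega
      · subst hw
        simp only
        omega
      · subst hw
        simp only
        omega
      · subst hw
        simp only
        omega
      · subst hw
        simp only
        omega
    · -- the new block's fields
      refine ⟨?_, ?_, hl1, hl2⟩
      · simp only [gfield]
        exact hbc
      · simp only [gfield]
        exact hby

/-- **`gif.SavedImages = malloc(56)`, NULL included: THE STATE INVARIANT** (DGifGetImageDesc l.454-455, the first array): the twin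
of `GifOK.pend_first`. `mem` is the memory at the return of `malloc`: the shape of the forest `F` (no array) still holds; `Hn`
owns what `F` owns and the new object `(q, 56)` (none if `q = 0`). `mem'` differs in a window of stack below the cursor and in the
field `gif.SavedImages`, which holds `q`. The forest's array is then the empty array of ONE slot at `q` (none if `q = 0`). -/
theorem GifOK.saved_first {Hn : Heap} {F : Forest} {R : Rd} {mem mem' : Mem} {q lo hi : Nat}
    (hshape : Shape F R mem) (hplaced : Placed Hn F.owned) (hokn : HeapOK Hn mem) (hbase : Hn.base = 0x800000)
    (hcur : 0x700000 ≤ R.cur ∧ R.cur + 16 ≤ 0x800000) (hx : F.saved = none)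
    (howns : Owns Hn ((if q = 0 then [] else [(q, 56)]) ++ F.owned))
    (hs : Mem.SameExcept [⟨lo, hi⟩, ⟨F.gif + 72, F.gif + 80⟩] mem mem') (hlo : 0x700000 ≤ lo) (hhi : hi ≤ R.cur)
    (hq : rd mem' (F.gif + 72) 8 = q) :
    GifOK Hn ({ F with saved := if q = 0 then none else some ⟨q, 1, []⟩ } : Forest) R mem' := by
  have hgw := hplaced.gif_where hokn hbase
  have hold : F.owned.Perm (F.ownedButSaved) := by
    have h := Forest.owned_saved F
    rw [hx] at h
    exact h
  -- the count is still 0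
  have hp := hshape.saved
  rw [hx] at hp
  obtain ⟨-, hc0⟩ := hp
  have ecount : GifFileType.ImageCount mem' F.gif = 0 := by
    simp only [gfield] at hc0 ⊢
    rw [hs.rd (F.gif + 32) 4 (by omega) ?_]
    · exact hc0
    · intro w hw
      simp only [List.mem_cons, List.not_mem_nil, or_false] at hw
      rcases hw with hw | hw
      · subst hw
        simp only
        omega
      · subst hw
        simp only
        omega
  have eptr : GifFileType.SavedImages mem' F.gif = q := by
    simp only [gfield]
    exact hq
  -- the windows: stack, `gif.SavedImages`
  have hl : ∀ w, w ∈ [(⟨lo, hi⟩ : Span), ⟨F.gif + 72, F.gif + 80⟩] → Loose Hn F R w ∨ (F.gif + 72 ≤ w.lo ∧ w.hi ≤ F.gif + 80) ∨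
      (F.gif + 32 ≤ w.lo ∧ w.hi ≤ F.gif + 36) ∨
      (∃ s x, F.saved = some s ∧ x ∈ Hn.objs ∧ x.base = s.arr ∧ s.arr ≤ w.lo ∧ w.hi ≤ s.arr + x.cap) := by
    intro w hw
    simp only [List.mem_cons, List.not_mem_nil, or_false] at hw
    rcases hw with hw | hw
    · subst hw
      left
      exact Loose.stack hokn (by simp only; omega) (by simp only; omega) (by simp only; omega)
    · subst hw
      right
      left
      exact ⟨Nat.le_refl _, Nat.le_refl _⟩
  by_cases hq0 : q = 0
  · -- the allocation failed: no array, as before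
    rw [if_pos hq0] at howns ⊢
    refine ⟨?_, ?_⟩
    · have h1 : Owns Hn F.owned := howns
      exact (h1.perm hold).perm (Forest.owned_saved_set F none)
    · apply hshape.set_saved hplaced hokn hcur hs hl
      rw [eptr, ecount]
      exact ⟨hq0, rfl⟩
  · -- the empty array of one slot
    rw [if_neg hq0] at howns ⊢
    refine ⟨?_, ?_⟩
    · have h1 : Owns Hn ((q, 56) :: F.ownedButSaved) := howns.perm (hold.cons _)
      have h2 : ((q, 56) :: F.ownedButSaved).Perm ({ F with saved := some ⟨q, 1, []⟩ } : Forest).owned :=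
        Forest.owned_saved_set F (some ⟨q, 1, []⟩)
      exact h1.perm h2
    · apply hshape.set_saved hplaced hokn hcur hs hl
      rw [eptr, ecount]
      exact SavedAt.first q 1 mem' (Nat.le_refl _)

/-- **`gif.SavedImages = reallocarray(gif.SavedImages, k, 56)`, in place or moved: THE STATE INVARIANT** (DGifGetImageDesc
l.445-452 with `k = ImageCount + 1`; DGifDecreaseImageCounter l.1171-1176 with `k = ImageCount`): the twin of `GifOK.pend_grown`.
`mem` is the memory at the return of `reallocarray`: the shape of the forest `F` with the array `s` still holds; `Hn` owns the
array `(q, 56 k)`, the counted images' objects and the other components' objects; the counted slots' bytes at `q` are those at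
`s.arr`. `mem'` differs in a window of stack below the cursor and in the field `gif.SavedImages`, which holds `q`: the images'
structural parts (their colour-map objects, their extension arrays: other objects of the heap) are not touched. -/
theorem GifOK.saved_grown {Hn : Heap} {F : Forest} {R : Rd} {mem mem' : Mem} {s : Saved} {q k lo hi : Nat}
    (hshape : Shape F R mem) (hplaced : Placed Hn F.owned) (hokn : HeapOK Hn mem) (hbase : Hn.base = 0x800000)
    (hcur : 0x700000 ≤ R.cur ∧ R.cur + 16 ≤ 0x800000) (hx : F.saved = some s)
    (howns : Owns Hn ((q, 56 * k) :: (s.imgs.flatMap Img.objs ++ F.ownedButSaved))) (hk : s.imgs.length ≤ k) (hk1 : 1 ≤ k)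
    (hcopy : ∀ i, i < 56 * s.imgs.length → rd mem (q + i) 1 = rd mem (s.arr + i) 1)
    (hs : Mem.SameExcept [⟨lo, hi⟩, ⟨F.gif + 72, F.gif + 80⟩] mem mem') (hlo : 0x700000 ≤ lo) (hhi : hi ≤ R.cur)
    (hq : rd mem' (F.gif + 72) 8 = q) :
    GifOK Hn ({ F with saved := some { s with arr := q, cap := k } } : Forest) R mem' := by
  have hgw := hplaced.gif_where hokn hbase
  have G := carry_Geo.intro hshape hplaced hokn hcur
  -- where the new array and the old one are
  have hqin : (q, 56 * k) ∈ (q, 56 * k) :: (s.imgs.flatMap Img.objs ++ F.ownedButSaved) := List.mem_cons_self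
  have hgin : (F.gif, 120) ∈ (q, 56 * k) :: (s.imgs.flatMap Img.objs ++ F.ownedButSaved) :=
    List.mem_cons_of_mem _ (List.mem_append_right _ List.mem_cons_self)
  have hqw := howns.inside hokn hqin
  simp only at hqw
  rw [hbase] at hqw
  have hqne : q ≠ F.gif :=
    (List.pairwise_cons.mp howns.apart).1 (F.gif, 120) (List.mem_append_right _ List.mem_cons_self)
  have hfar := howns.far hokn hqin hgin (by
    intro h
    exact hqne (congrArg Prod.fst h))
  simp only at hfar
  have harr : (s.arr, 56 * s.cap) ∈ F.owned := Forest.mem_owned_saved (by rw [hx]; exact List.mem_cons_self)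
  obtain ⟨o, ho, eo1, eo2⟩ := hplaced.at_ _ harr
  have hoin := hokn.obj_inside ho
  simp only at eo1 eo2
  -- the old array
  have hp := hshape.saved
  rw [hx] at hp
  have hlen := hp.2.2.1
  have ecount : GifFileType.ImageCount mem' F.gif = GifFileType.ImageCount mem F.gif := by
    simp only [gfield]
    apply hs.rd (F.gif + 32) 4 (by omega)
    intro w hw
    simp only [List.mem_cons, List.not_mem_nil, or_false] at hw
    rcases hw with hw | hw
    · subst hw
      simp only
      omega
    · subst hw
      simp only
      omega
  have eptr : GifFileType.SavedImages mem' F.gif = q := by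
    simp only [gfield]
    exact hq
  -- a structural part of a counted image: inside another object of the heap than gif
  have hstruct : ∀ o, o ∈ s.imgs.flatMap Img.structs →
      ∃ y, y ∈ Hn.objs ∧ y.base = o.1 ∧ o.2 ≤ y.cap ∧ (F.gif + 80 ≤ o.1 ∨ o.1 + o.2 ≤ F.gif + 72) := by
    intro o ho
    have hof : o ∈ F.structs := by
      apply carry_mem_structs_saved
      rw [hx]
      exact List.mem_cons_of_mem _ ho
    obtain ⟨y, hy, ey, hcap⟩ := G.structObj o hof
    obtain ⟨g, hg, eg, hgcap⟩ := G.gifObj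
    have hne : o.1 ≠ g.base := by
      rw [eg]
      exact (G.struct_ne o hof).1
    have hmiss := (G.in_obj hg (w := ⟨F.gif + 72, F.gif + 80⟩) (by simp only; omega) (by simp only; omega)).2.2.1 o hof hne
    simp only at hmiss
    refine ⟨y, hy, ey, hcap, ?_⟩
    omega
  refine ⟨howns.perm (Forest.owned_saved_set F (some { s with arr := q, cap := k })), ?_⟩
  apply hshape.set_saved hplaced hokn hcur hs
  · intro w hw
    simp only [List.mem_cons, List.not_mem_nil, or_false] at hw
    rcases hw with hw | hw
    · subst hw
      left
      exact Loose.stack hokn (by simp only; omega) (by simp only; omega) (by simp only; omega)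
    · subst hw
      right
      left
      exact ⟨Nat.le_refl _, Nat.le_refl _⟩
  · rw [eptr, ecount]
    apply SavedAt.moved hp q k ?_ ?_ ?_ hk hk1 (by omega) (by omega)
    · -- the counted slots: the copy, through the store
      intro i hi
      rw [← hcopy i hi]
      apply hs.rd (q + i) 1 (by omega)
      intro w hw
      simp only [List.mem_cons, List.not_mem_nil, or_false] at hw
      rcases hw with hw | hw
      · subst hw
        simp only
        omega
      · subst hw
        simp only
        omega
    · -- the images' structural parts are not touched
      intro o ho
      obtain ⟨y, hy, ey, hcap, hmiss⟩ := hstruct o ho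
      have hr := hokn.obj_range hy
      rw [hbase] at hr
      apply hs.eqOn
      intro w hw
      simp only [List.mem_cons, List.not_mem_nil, or_false] at hw
      rcases hw with hw | hw
      · subst hw
        simp only
        omega
      · subst hw
        simp only
        omega
    · intro o ho
      obtain ⟨y, hy, ey, hcap, -⟩ := hstruct o ho
      have hin := hokn.obj_inside hy
      omega

/-! ### 6. The frame of `GifAddExtensionBlock` -/

namespace GifAddExtensionBlock

/-- **THE FRAME OF `GifAddExtensionBlock` AT A LATER MEMORY** (the fields its three assertions `AfterArray`, `AfterBytes`, `Done`
share beyond the heap and the forest). `m` is a memory of the body with the six saved registers and the return address in their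
slots, the contract's footprint and `rem` since the entry `e`; `m'` differs from `m` in windows of the function's own stack below
the body's stack pointer (return addresses of the checks, the callees' frames) and in windows of the contract's coarse window
`[800000H, 1000020H)` (the heap's region, the shadow). Then the seven slots hold what they held, the contract's footprint is kept
and no input was read. `hroom`, `htop` are `he_room`, `he_top` of `v_entry`; `hcur` is `henv.ctx.cursor_range henv.heap.inv.shadow`.
The last step of every exit of segments 1, 2, 3: `obtain ⟨k15, k14, k13, k12, kbp, kbx, kra, ksame, krem⟩ := …`. -/
theorem frame_carry {R : Rd} {e : State} {ret : Word} {m m' : Mem} {ws : List Span}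
    (h15 : m.readLE (e.reg .rsp - 8) 8 = (e.reg .r15).toNat)
    (h14 : m.readLE (e.reg .rsp - 16) 8 = (e.reg .r14).toNat)
    (h13 : m.readLE (e.reg .rsp - 24) 8 = (e.reg .r13).toNat)
    (h12 : m.readLE (e.reg .rsp - 32) 8 = (e.reg .r12).toNat)
    (hbp : m.readLE (e.reg .rsp - 40) 8 = (e.reg .rbp).toNat)
    (hbx : m.readLE (e.reg .rsp - 48) 8 = (e.reg .rbx).toNat)
    (hra : UInt64.ofNat (m.readLE (e.reg .rsp) 8) = ret)
    (hrem : rem R m = rem R e.mem)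
    (hsame : Mem.SameExcept [⟨(e.reg .rsp).toNat - 208, (e.reg .rsp).toNat⟩, ⟨0x800000, 0x1000020⟩] e.mem m)
    (hroom : 0x700000 + 208 ≤ (e.reg .rsp).toNat) (htop : (e.reg .rsp).toNat + 8 ≤ 0x800000)
    (hcur : 0x700000 ≤ R.cur ∧ R.cur + 16 ≤ 0x800000 ∧ (e.reg .rsp).toNat + 8 ≤ R.cur)
    (hs : Mem.SameExcept ws m m')
    (hws : ∀ w, w ∈ ws → ((e.reg .rsp).toNat - 208 ≤ w.lo ∧ w.hi ≤ (e.reg .rsp).toNat - 56) ∨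
      (0x800000 ≤ w.lo ∧ w.hi ≤ 0x1000020)) :
    m'.readLE (e.reg .rsp - 8) 8 = (e.reg .r15).toNat ∧
    m'.readLE (e.reg .rsp - 16) 8 = (e.reg .r14).toNat ∧
    m'.readLE (e.reg .rsp - 24) 8 = (e.reg .r13).toNat ∧
    m'.readLE (e.reg .rsp - 32) 8 = (e.reg .r12).toNat ∧
    m'.readLE (e.reg .rsp - 40) 8 = (e.reg .rbp).toNat ∧
    m'.readLE (e.reg .rsp - 48) 8 = (e.reg .rbx).toNat ∧
    UInt64.ofNat (m'.readLE (e.reg .rsp) 8) = ret ∧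
    Mem.SameExcept [⟨(e.reg .rsp).toNat - 208, (e.reg .rsp).toNat⟩, ⟨0x800000, 0x1000020⟩] e.mem m' ∧
    rem R m' = rem R e.mem := by
  -- a saved-register slot `[rsp − off, rsp − off + 8)`, `8 ≤ off ≤ 48`, is missed by every window
  have hslot : ∀ (off x : Nat), 8 ≤ off → off ≤ 48 → m.readLE (e.reg .rsp - UInt64.ofNat off) 8 = x →
      m'.readLE (e.reg .rsp - UInt64.ofNat off) 8 = x := by
    intro off x h8 h48 hx
    apply slot_sameExcept hs (e.reg .rsp) off 8 x (by omega) h8 hx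
    intro w hw
    have := hws w hw
    omega
  -- the return-address slot `[rsp, rsp + 8)` too
  have hret : m'.readLE (e.reg .rsp) 8 = m.readLE (e.reg .rsp) 8 := by
    apply hs.readLE (e.reg .rsp) 8 (by omega)
    intro w hw
    have := hws w hw
    omega
  refine ⟨hslot 8 _ (by omega) (by omega) h15, hslot 16 _ (by omega) (by omega) h14,
    hslot 24 _ (by omega) (by omega) h13, hslot 32 _ (by omega) (by omega) h12,
    hslot 40 _ (by omega) (by omega) hbp, hslot 48 _ (by omega) (by omega) hbx, ?_, ?_, ?_⟩
  · rw [hret]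
    exact hra
  · -- the contract's footprint
    apply Mem.SameExcept.step_same' hsame hs
    intro w hw
    by_cases hempty : w.hi ≤ w.lo
    · left
      exact hempty
    right
    rcases hws w hw with ⟨a, b⟩ | ⟨a, b⟩
    · refine ⟨⟨(e.reg .rsp).toNat - 208, (e.reg .rsp).toNat⟩, ?_, ?_, ?_⟩
      · simp only [List.mem_cons, true_or]
      · simp only
        omega
      · simp only
        omega
    · refine ⟨⟨0x800000, 0x1000020⟩, ?_, ?_, ?_⟩
      · simp only [List.mem_cons, true_or, or_true]
      · simp only
        omega
      · simp only
        omega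
  · -- the cursor lies in the stack at or above the return address: every window misses it
    rw [← hrem]
    apply rem_sameExcept hs (by omega)
    intro w hw
    have := hws w hw
    omega

/-- **The frame from the cut 107BA6H** (`AfterArray`): `frame_carry` for a segment that starts there (segment 2). -/
theorem AfterArray.frame_carry {H : Heap} {rest : List Obj} {frames : List (Nat × FrameLayout)} {F : Forest} {R : Rd} {len : Nat}
    {Hc : Heap} {Fc : Forest} {u₀ e : State} {ret : Word} {v : State}
    (hat : AfterArray H rest frames F R len Hc Fc u₀ e ret v)
    (hroom : 0x700000 + 208 ≤ (e.reg .rsp).toNat) (htop : (e.reg .rsp).toNat + 8 ≤ 0x800000)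
    (hcur : 0x700000 ≤ R.cur ∧ R.cur + 16 ≤ 0x800000 ∧ (e.reg .rsp).toNat + 8 ≤ R.cur)
    {m' : Mem} {ws : List Span} (hs : Mem.SameExcept ws v.mem m')
    (hws : ∀ w, w ∈ ws → ((e.reg .rsp).toNat - 208 ≤ w.lo ∧ w.hi ≤ (e.reg .rsp).toNat - 56) ∨
      (0x800000 ≤ w.lo ∧ w.hi ≤ 0x1000020)) :
    m'.readLE (e.reg .rsp - 8) 8 = (e.reg .r15).toNat ∧
    m'.readLE (e.reg .rsp - 16) 8 = (e.reg .r14).toNat ∧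
    m'.readLE (e.reg .rsp - 24) 8 = (e.reg .r13).toNat ∧
    m'.readLE (e.reg .rsp - 32) 8 = (e.reg .r12).toNat ∧
    m'.readLE (e.reg .rsp - 40) 8 = (e.reg .rbp).toNat ∧
    m'.readLE (e.reg .rsp - 48) 8 = (e.reg .rbx).toNat ∧
    UInt64.ofNat (m'.readLE (e.reg .rsp) 8) = ret ∧
    Mem.SameExcept [⟨(e.reg .rsp).toNat - 208, (e.reg .rsp).toNat⟩, ⟨0x800000, 0x1000020⟩] e.mem m' ∧
    Gif.Spec.rem R m' = Gif.Spec.rem R e.mem :=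
  GifAddExtensionBlock.frame_carry hat.slot_r15 hat.slot_r14 hat.slot_r13 hat.slot_r12 hat.slot_rbp hat.slot_rbx hat.slot_ra hat.rem
    hat.same hroom htop hcur hs hws

/-- **The frame from the cut 107C05H** (`AfterBytes`): `frame_carry` for a segment that starts there (segment 3). -/
theorem AfterBytes.frame_carry {H : Heap} {rest : List Obj} {frames : List (Nat × FrameLayout)} {F : Forest} {R : Rd} {len : Nat}
    {Hc : Heap} {Fc : Forest} {u₀ e : State} {ret : Word} {v : State}
    (hat : AfterBytes H rest frames F R len Hc Fc u₀ e ret v)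
    (hroom : 0x700000 + 208 ≤ (e.reg .rsp).toNat) (htop : (e.reg .rsp).toNat + 8 ≤ 0x800000)
    (hcur : 0x700000 ≤ R.cur ∧ R.cur + 16 ≤ 0x800000 ∧ (e.reg .rsp).toNat + 8 ≤ R.cur)
    {m' : Mem} {ws : List Span} (hs : Mem.SameExcept ws v.mem m')
    (hws : ∀ w, w ∈ ws → ((e.reg .rsp).toNat - 208 ≤ w.lo ∧ w.hi ≤ (e.reg .rsp).toNat - 56) ∨
      (0x800000 ≤ w.lo ∧ w.hi ≤ 0x1000020)) :
    m'.readLE (e.reg .rsp - 8) 8 = (e.reg .r15).toNat ∧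
    m'.readLE (e.reg .rsp - 16) 8 = (e.reg .r14).toNat ∧
    m'.readLE (e.reg .rsp - 24) 8 = (e.reg .r13).toNat ∧
    m'.readLE (e.reg .rsp - 32) 8 = (e.reg .r12).toNat ∧
    m'.readLE (e.reg .rsp - 40) 8 = (e.reg .rbp).toNat ∧
    m'.readLE (e.reg .rsp - 48) 8 = (e.reg .rbx).toNat ∧
    UInt64.ofNat (m'.readLE (e.reg .rsp) 8) = ret ∧
    Mem.SameExcept [⟨(e.reg .rsp).toNat - 208, (e.reg .rsp).toNat⟩, ⟨0x800000, 0x1000020⟩] e.mem m' ∧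
    Gif.Spec.rem R m' = Gif.Spec.rem R e.mem :=
  GifAddExtensionBlock.frame_carry hat.slot_r15 hat.slot_r14 hat.slot_r13 hat.slot_r12 hat.slot_rbp hat.slot_rbx hat.slot_ra hat.rem
    hat.same hroom htop hcur hs hws

end GifAddExtensionBlock

end Gif.Spec
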